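-- pv_equiv track=rewrite | github.com/tongosu/ddonilang | tests/run_dialect_alias_collision_contract_selftest.py | split_keyword_alias_tokens
-- ===== SOURCE A (Python) =====
-- def is_ident_start(ch: str) -> bool:
--     return ch == "_" or ch.isalpha()
--
-- def is_ident_continue(ch: str) -> bool:
--     return is_ident_start(ch) or ch.isnumeric()
--
-- def is_ident_like(text: str) -> bool:
--     if not text:
--         return False
--     if not is_ident_start(text[0]):
--         return False
--     return all(is_ident_continue(ch) for ch in text[1:])
--
-- def normalize_keyword_token(token: str) -> str | None:
--     text = token.strip()
--     if not text:
--         return None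
--     if text.endswith(":"):
--         text = text[:-1]
--     if not text or "#" in text or " " in text or "\t" in text:
--         return None
--     if not is_ident_like(text):
--         return None
--     return text
--
-- def split_keyword_alias_tokens(raw: str) -> list[str]:
--     tokens: list[str] = []
--     for value in raw.split("/"):
--         for subvalue in value.split("|"):
--             for item in subvalue.split(","):
--                 for piece in item.split(";"):
--                     normalized = normalize_keyword_token(piece)
--                     if normalized is not None:
--                         tokens.append(normalized)
--     return tokens
-- ===== SOURCE B (Python) =====
-- def is_ident_start(ch: str) -> bool:
--     return ch == "_" or ch.isalpha()
--
-- def is_ident_continue(ch: str) -> bool: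
--     return is_ident_start(ch) or ch.isnumeric()
--
-- def is_ident_like(text: str) -> bool:
--     if not text:
--         return False
--     if not is_ident_start(text[0]):
--         return False
--     return all(is_ident_continue(ch) for ch in text[1:])
--
-- def normalize_keyword_token(token: str) -> str | None:
--     text = token.strip()
--     if not text:
--         return None
--     if text.endswith(":"):
--         text = text[:-1]
--     if not text or "#" in text or " " in text or "\t" in text:
--         return None
--     if not is_ident_like(text):
--         return None
--     return text
--
-- def split_keyword_alias_tokens(raw: str) -> list[str]:
--     # single left-to-right scan: flush the current piece at every delimiter
--     tokens: list[str] = []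
--     piece = ""
--     for ch in raw:
--         if ch == "/" or ch == "|" or ch == "," or ch == ";":
--             normalized = normalize_keyword_token(piece)
--             if normalized is not None:
--                 tokens.append(normalized)
--             piece = ""
--         else:
--             piece += ch
--     normalized = normalize_keyword_token(piece)
--     if normalized is not None:
--         tokens.append(normalized)
--     return tokens
-- ===== Notes on version B (the rewrite author's own statement) =====
-- stated objective: simpler
-- what changed: Replaces the four nested split-then-loop passes (split on '/', then '|', then ',', then ';') by a single left-to-right character scan that flushes and normalizes the current piece at each delimiter.
import Mathlib
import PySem

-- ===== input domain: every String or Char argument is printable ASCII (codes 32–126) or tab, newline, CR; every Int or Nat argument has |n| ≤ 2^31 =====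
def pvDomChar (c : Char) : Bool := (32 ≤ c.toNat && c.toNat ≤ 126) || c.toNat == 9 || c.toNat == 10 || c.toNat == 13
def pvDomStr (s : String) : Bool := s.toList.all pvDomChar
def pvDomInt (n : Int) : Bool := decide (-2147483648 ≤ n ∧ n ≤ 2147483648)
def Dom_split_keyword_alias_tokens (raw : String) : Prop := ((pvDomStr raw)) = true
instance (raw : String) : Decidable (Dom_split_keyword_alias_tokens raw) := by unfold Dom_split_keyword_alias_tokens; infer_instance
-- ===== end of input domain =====

-- B replaces A's four nested split-loops by one left-to-right scan that flushes the
-- current piece at every delimiter (objective: simpler / single flat pass).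

-- ===== PORT A =====
-- shared module helpers (used verbatim by the Python of A and of B)
def is_ident_start (ch : Char) : Bool :=
  ch == '_' || PySem.Chars.isalpha ch

-- ch.isnumeric() agrees with ch.isdigit() on the printable-ASCII domain
def is_ident_continue (ch : Char) : Bool :=
  is_ident_start ch || PySem.Chars.isdigit ch

def is_ident_like (text : String) : Bool :=
  match text.toList with
  | [] => false
  | c :: rest => is_ident_start c && rest.all (fun ch => is_ident_continue ch)

def normalize_keyword_token (token : String) : Option String :=
  let text := PySem.Str.strip token
  if text = "" then none
  else
    let text := if PySem.Str.endswith text ":" then PySem.Str.slice text none (some (-1)) else text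
    if text = "" || PySem.Str.isIn "#" text || PySem.Str.isIn " " text || PySem.Str.isIn "\t" text then
      none
    else if !(is_ident_like text) then none
    else some text

-- Python s.split(sep) for a non-empty literal sep (PySem.Str.split? without the empty-sep ValueError)
def pySplit (s sep : String) : List String :=
  (PySem.Chars.splitOn s.toList sep.toList).map String.ofList

def split_keyword_alias_tokens (raw : String) : List String :=
  (pySplit raw "/").foldl (fun tokens value =>
    (pySplit value "|").foldl (fun tokens subvalue =>
      (pySplit subvalue ",").foldl (fun tokens item =>
        (pySplit item ";").foldl (fun tokens piece =>
          match normalize_keyword_token piece with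
          | some normalized => tokens ++ [normalized]
          | none => tokens) tokens) tokens) tokens) []

-- ===== PORT B =====
-- the single scan of Source B: `piece` is the pending piece, flushed at each delimiter
def altFlush (piece : List Char) (tokens : List String) : List String :=
  match normalize_keyword_token (String.ofList piece) with
  | some normalized => tokens ++ [normalized]
  | none => tokens

def altGo : List Char → List Char → List String → List String
  | [], piece, tokens => altFlush piece tokens
  | c :: rest, piece, tokens =>
    if c == '/' || c == '|' || c == ',' || c == ';' then
      altGo rest [] (altFlush piece tokens)
    else
      altGo rest (piece ++ [c]) tokens

def split_keyword_alias_tokens_alt (raw : String) : List String :=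
  altGo raw.toList [] []

-- ===== PRECONDITION & SPEC =====
def Spec_split_keyword_alias_tokens (raw : String) (out : List String) : Prop := out = split_keyword_alias_tokens_alt raw
instance (raw : String) (out : List String) : Decidable (Spec_split_keyword_alias_tokens raw out) := by unfold Spec_split_keyword_alias_tokens; infer_instance

-- ===== CLAIM (what is proved, stated in full; the proofs are below) =====
def Claim_equal_split_keyword_alias_tokens : Prop := ∀ (raw : String), Dom_split_keyword_alias_tokens raw → Spec_split_keyword_alias_tokens raw (split_keyword_alias_tokens raw)

-- ===== LEMMAS AND PROOFS =====

-- reference split on a character predicate (proof-only)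
def splitPred (p : Char → Bool) : List Char → List (List Char)
  | [] => [[]]
  | c :: rest =>
    if p c then [] :: splitPred p rest
    else
      match splitPred p rest with
      | [] => [[c]]
      | q :: qs => (c :: q) :: qs

theorem splitPred_ne_nil (p : Char → Bool) (cs : List Char) : splitPred p cs ≠ [] := by
  cases cs with
  | nil => simp [splitPred]
  | cons c rest =>
    simp only [splitPred]
    split
    · simp
    · split <;> simp

theorem splitOn_go_eq (d : Char) (fuel : Nat) (l cur : List Char) (acc : List (List Char))
    (h : l.length ≤ fuel) :
    PySem.Chars.splitOn.go [d] fuel l cur acc =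
      acc.reverse ++
        (match splitPred (· == d) l with
         | [] => [cur.reverse]
         | q :: qs => (cur.reverse ++ q) :: qs) := by
  induction fuel generalizing l cur acc with
  | zero =>
    have : l = [] := by cases l <;> simp_all
    subst this
    rw [PySem.Chars.splitOn.go.eq_def]
    simp [splitPred]
  | succ fuel ih =>
    cases l with
    | nil =>
      rw [PySem.Chars.splitOn.go.eq_def]
      simp [splitPred]
    | cons c rest =>
      rw [PySem.Chars.splitOn.go.eq_def]
      simp only [List.isPrefixOf, Bool.and_true, List.length_singleton,
        List.drop_succ_cons, List.drop_zero]
      have hrest : rest.length ≤ fuel := by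
        simp only [List.length_cons] at h; omega
      by_cases hc : (d == c) = true
      · rw [if_pos hc, ih rest [] (cur.reverse :: acc) hrest]
        have hcd : (c == d) = true := by
          rw [beq_iff_eq] at hc ⊢; exact hc.symm
        simp only [splitPred, hcd, if_true]
        cases hsp : splitPred (· == d) rest with
        | nil => exact absurd hsp (splitPred_ne_nil _ _)
        | cons q qs => simp
      · rw [if_neg hc, ih rest (c :: cur) acc hrest]
        have hcd : (c == d) = false := by
          simp only [beq_iff_eq] at hc; exact beq_eq_false_iff_ne.mpr (Ne.symm hc)
        simp only [splitPred, hcd, Bool.false_eq_true, if_false]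
        cases hsp : splitPred (· == d) rest with
        | nil => exact absurd hsp (splitPred_ne_nil _ _)
        | cons q qs => simp

theorem splitOn_eq_splitPred (d : Char) (cs : List Char) :
    PySem.Chars.splitOn cs [d] = splitPred (· == d) cs := by
  unfold PySem.Chars.splitOn
  rw [splitOn_go_eq d (cs.length + 1) cs [] [] (by omega)]
  cases hsp : splitPred (· == d) cs with
  | nil => exact absurd hsp (splitPred_ne_nil _ _)
  | cons q qs => simp

theorem splitPred_flatMap (p q : Char → Bool) (cs : List Char) :
    (splitPred p cs).flatMap (splitPred q) = splitPred (fun c => p c || q c) cs := by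
  induction cs with
  | nil => simp [splitPred]
  | cons c rest ih =>
    by_cases hp : p c
    · have e1 : splitPred p (c :: rest) = [] :: splitPred p rest := by simp [splitPred, hp]
      have e2 : splitPred (fun c => p c || q c) (c :: rest) =
          [] :: splitPred (fun c => p c || q c) rest := by simp [splitPred, hp]
      rw [e1, e2, List.flatMap_cons, ih]
      simp [splitPred]
    · have h1 : splitPred p (c :: rest) =
          match splitPred p rest with
          | [] => [[c]]
          | q' :: qs => (c :: q') :: qs := by
        simp [splitPred, hp]
      cases hsp : splitPred p rest with
      | nil => exact absurd hsp (splitPred_ne_nil _ _)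
      | cons p0 ps =>
        rw [h1, hsp]
        have hIH : splitPred q p0 ++ ps.flatMap (splitPred q) =
            splitPred (fun c => p c || q c) rest := by
          rw [← ih, hsp, List.flatMap_cons]
        by_cases hq : q c
        · simp only [List.flatMap_cons, splitPred, hq, hp, Bool.false_or, if_true]
          rw [← hIH]; rfl
        · simp only [List.flatMap_cons]
          have h2 : splitPred q (c :: p0) =
              match splitPred q p0 with
              | [] => [[c]]
              | q' :: qs => (c :: q') :: qs := by
            simp [splitPred, hq]
          have h3 : splitPred (fun c => p c || q c) (c :: rest) =
              match splitPred (fun c => p c || q c) rest with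
              | [] => [[c]]
              | q' :: qs => (c :: q') :: qs := by
            simp [splitPred, hp, hq]
          cases hq0 : splitPred q p0 with
          | nil => exact absurd hq0 (splitPred_ne_nil _ _)
          | cons q0 qs =>
            rw [h2, hq0, h3, ← hIH, hq0]
            simp

-- B's delimiter predicate
def isDelim (c : Char) : Bool := c == '/' || c == '|' || c == ',' || c == ';'

theorem altGo_spec (cs piece : List Char) (tokens : List String) :
    altGo cs piece tokens =
      tokens ++
        ((match splitPred isDelim cs with
          | [] => [piece]
          | q :: qs => (piece ++ q) :: qs).map String.ofList).filterMap normalize_keyword_token := by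
  induction cs generalizing piece tokens with
  | nil =>
    show altFlush piece tokens = _
    unfold altFlush
    cases h : normalize_keyword_token (String.ofList piece) <;> simp [splitPred, h]
  | cons c rest ih =>
    cases hc : isDelim c with
    | true =>
      have hstep : altGo (c :: rest) piece tokens = altGo rest [] (altFlush piece tokens) := by
        simp only [altGo]
        rw [show (c == '/' || c == '|' || c == ',' || c == ';') = true from hc]
        simp
      have hsp2 : splitPred isDelim (c :: rest) = [] :: splitPred isDelim rest := by
        simp [splitPred, hc]
      rw [hstep, ih, hsp2]
      cases hsp : splitPred isDelim rest with
      | nil => exact absurd hsp (splitPred_ne_nil _ _)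
      | cons q qs =>
        simp only [List.map_cons, List.filterMap_cons, altFlush]
        cases h : normalize_keyword_token (String.ofList piece) <;> simp [h]
    | false =>
      have hstep : altGo (c :: rest) piece tokens = altGo rest (piece ++ [c]) tokens := by
        simp only [altGo]
        rw [show (c == '/' || c == '|' || c == ',' || c == ';') = false from hc]
        simp
      have hsp2 : splitPred isDelim (c :: rest) =
          match splitPred isDelim rest with
          | [] => [[c]]
          | q :: qs => (c :: q) :: qs := by
        simp [splitPred, hc]
      rw [hstep, ih, hsp2]
      cases hsp : splitPred isDelim rest with
      | nil => exact absurd hsp (splitPred_ne_nil _ _)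
      | cons q qs => simp

theorem foldl_normalize (l : List String) (acc : List String) :
    l.foldl (fun tokens piece =>
        match normalize_keyword_token piece with
        | some normalized => tokens ++ [normalized]
        | none => tokens) acc = acc ++ l.filterMap normalize_keyword_token := by
  induction l generalizing acc with
  | nil => simp
  | cons x xs ih =>
    simp only [List.foldl_cons, List.filterMap_cons, ih]
    cases normalize_keyword_token x <;> simp

-- ===== VERDICT (by name: the statement is the Claim_ definition above) =====
theorem split_keyword_alias_tokens_spec : Claim_equal_split_keyword_alias_tokens := by
  intro raw _
  show split_keyword_alias_tokens raw = split_keyword_alias_tokens_alt raw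
  -- A's side: flatten the four nested folds into one predicate split
  have hA : split_keyword_alias_tokens raw =
      ((splitPred isDelim raw.toList).map String.ofList).filterMap normalize_keyword_token := by
    unfold split_keyword_alias_tokens
    simp only [foldl_normalize, PySem.List.foldl_append_eq_flatMap, List.nil_append]
    simp only [pySplit, List.flatMap_map, ← List.filterMap_flatMap, ← List.map_flatMap,
      String.toList_ofList]
    have hsep : ("/" : String).toList = ['/'] ∧ ("|" : String).toList = ['|'] ∧
        ("," : String).toList = [','] ∧ (";" : String).toList = [';'] := by decide
    rw [hsep.1, hsep.2.1, hsep.2.2.1, hsep.2.2.2]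
    simp only [splitOn_eq_splitPred]
    rw [show ∀ l : List (List Char), (l.flatMap fun v => (splitPred (· == '|') v).flatMap
          fun s => (splitPred (· == ',') s).flatMap fun i => splitPred (· == ';') i) =
        (l.flatMap (splitPred (· == '|'))).flatMap
          ((splitPred (· == ',')) · |>.flatMap (splitPred (· == ';'))) from
      fun l => by simp [List.flatMap_assoc]]
    rw [show ∀ l : List (List Char),
        (l.flatMap fun s => (splitPred (· == ',') s).flatMap (splitPred (· == ';'))) =
        (l.flatMap (splitPred (· == ','))).flatMap (splitPred (· == ';')) from
      fun l => by simp [List.flatMap_assoc]]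
    simp only [splitPred_flatMap]
    rfl
  have hB : split_keyword_alias_tokens_alt raw =
      ((splitPred isDelim raw.toList).map String.ofList).filterMap normalize_keyword_token := by
    unfold split_keyword_alias_tokens_alt
    rw [altGo_spec]
    cases hsp : splitPred isDelim raw.toList with
    | nil => exact absurd hsp (splitPred_ne_nil _ _)
    | cons q qs => simp
  rw [hA, hB]
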